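-- pv_equiv track=rewrite | github.com/soubhik-sen/FLUXPORT | app/api/v1/endpoints/reports.py | _filter_po_numbers_by_raw_filter
-- ===== SOURCE A (Python) =====
-- from fnmatch import fnmatchcase
--
-- def _normalize_po_filter_values(value) -> list[str]:
--     if value is None:
--         return []
--     if isinstance(value, list):
--         return [str(v) for v in value if v is not None and str(v).strip()]
--     text = str(value).strip()
--     return [text] if text else []
--
-- def _is_pattern_po_filter_value(value: str) -> bool:
--     text = (value or "").strip()
--     if not text:
--         return False
--     # Treat wildcard-style values as pattern filters, not explicit PO numbers.
--     return any(token in text for token in ("*", "?", "%", "_"))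
--
-- def _matches_po_filter_value(po_number: str, raw_value: str) -> bool:
--     value = (raw_value or "").strip()
--     if not value:
--         return True
--     if _is_pattern_po_filter_value(value):
--         pattern = value.replace("%", "*").replace("_", "?")
--         return fnmatchcase(po_number.lower(), pattern.lower())
--     return po_number == value
--
-- def _filter_po_numbers_by_raw_filter(po_numbers: list[str], raw_filter_value) -> list[str]:
--     values = _normalize_po_filter_values(raw_filter_value)
--     if not values:
--         return po_numbers
--     filtered: list[str] = []
--     for po in po_numbers:
--         if any(_matches_po_filter_value(po, raw) for raw in values):
--             filtered.append(po)
--     return filtered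
-- ===== SOURCE B (Python) =====
-- def _wildcard_match(pattern, text):
--     """Anchored wildcard match ('*' = any run, '?' = any one char, all else
--     literal), computed as the set of text positions reachable after each
--     pattern character."""
--     n = len(text)
--     pos = {0}
--     for ch in pattern:
--         if ch == "*":
--             pos = set(range(min(pos), n + 1)) if pos else pos
--         elif ch == "?":
--             pos = {j + 1 for j in pos if j < n}
--         else:
--             pos = {j + 1 for j in pos if j < n and text[j] == ch}
--     return n in pos
--
--
-- def _filter_po_numbers_by_raw_filter(po_numbers, raw_filter_value):
--     # Normalize the raw filter into stripped, non-empty string values.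
--     if raw_filter_value is None:
--         raw_values = []
--     elif isinstance(raw_filter_value, list):
--         raw_values = [str(v) for v in raw_filter_value if v is not None]
--     else:
--         raw_values = [str(raw_filter_value)]
--     values = [t for t in (v.strip() for v in raw_values) if t]
--     if not values:
--         return po_numbers
--     # Partition once: exact PO numbers (case-sensitive) vs lowered wildcard
--     # patterns (SQL-style % and _ normalized to * and ?), matched case-insensitively.
--     exact = set()
--     patterns = []
--     for v in values:
--         if any(ch in v for ch in "*?%_"):
--             patterns.append(v.replace("%", "*").replace("_", "?").lower())
--         else:
--             exact.add(v)
--     return [po for po in po_numbers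
--             if po in exact or any(_wildcard_match(p, po.lower()) for p in patterns)]
-- ===== Notes on version B (the rewrite author's own statement) =====
-- stated objective: alternative
-- what changed: A re-strips, re-classifies and re-translates every filter value inside an any() for every PO and delegates matching to fnmatchcase's regex; B partitions the stripped values once into a case-sensitive exact set and a list of lowered glob patterns, then filters in one pass using its own position-set wildcard matcher (the set of text positions reachable after each pattern character). …
-- outside the precondition, e.g. on _filter_po_numbers_by_raw_filter(['A1'], ['[Aa]*']): A returns ['A1'], B returns []
import Mathlib
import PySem

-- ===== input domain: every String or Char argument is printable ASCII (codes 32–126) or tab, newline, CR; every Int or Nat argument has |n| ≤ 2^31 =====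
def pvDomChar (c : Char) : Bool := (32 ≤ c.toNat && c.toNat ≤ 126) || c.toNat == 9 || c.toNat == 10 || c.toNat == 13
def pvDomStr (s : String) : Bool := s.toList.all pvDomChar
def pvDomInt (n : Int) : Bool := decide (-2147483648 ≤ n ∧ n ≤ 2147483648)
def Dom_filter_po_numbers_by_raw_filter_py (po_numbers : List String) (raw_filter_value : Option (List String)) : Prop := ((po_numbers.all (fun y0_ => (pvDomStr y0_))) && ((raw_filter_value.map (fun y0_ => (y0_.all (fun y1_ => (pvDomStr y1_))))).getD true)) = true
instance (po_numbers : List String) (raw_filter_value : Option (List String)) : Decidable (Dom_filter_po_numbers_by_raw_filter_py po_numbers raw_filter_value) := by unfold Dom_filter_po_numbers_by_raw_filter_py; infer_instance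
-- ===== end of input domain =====

-- B replaces A's per-PO rescan of the raw filter values (re-stripping, re-classifying and
-- re-translating each value for every PO, with fnmatch doing the matching) by a one-time
-- partition of the stripped values into an exact-match set and a list of lowered glob
-- patterns, matched in a single pass by a position-set wildcard matcher.

-- ===== PORT A =====
-- Model of fnmatch.fnmatchcase (anchored, '.'/'*' from translate match any char incl. newline):
-- backtracking matcher; EXACT for patterns containing no '[' (translate then maps '*' to '.*',
-- '?' to '.' and escapes every other character) — Pre_ excludes filter values that would send
-- a '[' to fnmatchcase.
def pvGlob : List Char → List Char → Bool
  | [], s => s.isEmpty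
  | c :: p, s =>
    if c = '*' then
      pvGlob p s || (match s with | [] => false | _ :: s' => pvGlob (c :: p) s')
    else
      match s with
      | [] => false
      | d :: s' => (c == '?' || c == d) && pvGlob p s'
  termination_by p s => (s.length, p.length)

def pvFnmatchcase (name pat : String) : Bool := pvGlob pat.toList name.toList

-- _normalize_po_filter_values for the typed domain Option (List String) (no None elements,
-- str(v) is the identity on strings): keep values whose strip is non-empty
def pyNormalizePoFilterValues (raw : Option (List String)) : List String :=
  match raw with
  | none => []
  | some l => l.filter (fun v => PySem.Str.strip v != "")

def pyIsPatternPoFilterValue (value : String) : Bool :=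
  let text := PySem.Str.strip value
  if text == "" then false
  else ["*", "?", "%", "_"].any (fun tok => PySem.Str.isIn tok text)

def pyMatchesPoFilterValue (po_number raw_value : String) : Bool :=
  let value := PySem.Str.strip raw_value
  if value == "" then true
  else if pyIsPatternPoFilterValue value then
    let pattern := PySem.Str.replace (PySem.Str.replace value "%" "*") "_" "?"
    pvFnmatchcase (PySem.Str.lower po_number) (PySem.Str.lower pattern)
  else po_number == value

def filter_po_numbers_by_raw_filter_py (po_numbers : List String) (raw_filter_value : Option (List String)) : List String :=
  let values := pyNormalizePoFilterValues raw_filter_value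
  if values = [] then po_numbers
  else po_numbers.foldl
    (fun filtered po => if values.any (fun raw => pyMatchesPoFilterValue po raw) then filtered ++ [po] else filtered)
    []

-- ===== PORT B =====
-- Source B's _wildcard_match: fold over the pattern maintaining the set of text positions
-- reachable after the processed pattern prefix ('*'  -> everything from min(pos) to n,
-- '?' -> shift, literal -> shift where the text agrees)
def pbWildStep (t : List Char) (pos : PySem.Set Nat) (ch : Char) : PySem.Set Nat :=
  if ch = '*' then
    match PySem.List.min? pos (fun j => j) with
    | none => pos
    | some m => PySem.Set.ofList (List.range' m (t.length + 1 - m))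
  else if ch = '?' then
    PySem.Set.ofList ((pos.filter (fun j => j < t.length)).map (fun j => j + 1))
  else
    PySem.Set.ofList ((pos.filter (fun j => decide (j < t.length) && (t.getD j ch == ch))).map (fun j => j + 1))

def pbWildMatch (pattern text : String) : Bool :=
  (pattern.toList.foldl (pbWildStep text.toList) (PySem.Set.ofList [0])).contains text.toList.length

-- one preprocessing fold: exact-match set + lowered glob patterns
def pbStep (ep : PySem.Set String × List String) (v : String) : PySem.Set String × List String :=
  if ["*", "?", "%", "_"].any (fun ch => PySem.Str.isIn ch v) then
    (ep.1, ep.2 ++ [PySem.Str.lower (PySem.Str.replace (PySem.Str.replace v "%" "*") "_" "?")])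
  else (PySem.Set.add ep.1 v, ep.2)

def filter_po_numbers_by_raw_filter_py_alt (po_numbers : List String) (raw_filter_value : Option (List String)) : List String :=
  let values : List String :=
    match raw_filter_value with
    | none => []
    | some l => ((l.map (fun v => PySem.Str.strip v)).filter (fun t => t != ""))
  if values = [] then po_numbers
  else
    let ep := values.foldl pbStep (PySem.Set.empty, [])
    po_numbers.filter (fun po =>
      PySem.Set.contains ep.1 po || ep.2.any (fun p => pbWildMatch p (PySem.Str.lower po)))

-- ===== PRECONDITION & SPEC =====
-- Pre_ excludes inputs where some filter value combines a wildcard character (* ? % _) with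
-- '[' : A then hands fnmatch a '[...]' regex character class (an artefact of implementing
-- SQL-LIKE-style filtering via fnmatch) which the glob matcher modelled here treats literally.
def Pre_filter_po_numbers_by_raw_filter_py (po_numbers : List String) (raw_filter_value : Option (List String)) : Prop :=
  ((raw_filter_value.getD []).all (fun v =>
    !(["*", "?", "%", "_"].any (fun tok => PySem.Str.isIn tok (PySem.Str.strip v)))
      || !(PySem.Str.isIn "[" (PySem.Str.strip v)))) = true
instance (po_numbers : List String) (raw_filter_value : Option (List String)) : Decidable (Pre_filter_po_numbers_by_raw_filter_py po_numbers raw_filter_value) := by unfold Pre_filter_po_numbers_by_raw_filter_py; infer_instance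

def pvWitness_filter_po_numbers_by_raw_filter_py : List String × Option (List String) :=
  (["PO-1001", "PO-2002", "ZZ-9"], some ["po-1*", "PO-2002"])

def Spec_filter_po_numbers_by_raw_filter_py (po_numbers : List String) (raw_filter_value : Option (List String)) (out : List String) : Prop := out = filter_po_numbers_by_raw_filter_py_alt po_numbers raw_filter_value
instance (po_numbers : List String) (raw_filter_value : Option (List String)) (out : List String) : Decidable (Spec_filter_po_numbers_by_raw_filter_py po_numbers raw_filter_value out) := by unfold Spec_filter_po_numbers_by_raw_filter_py; infer_instance

-- ===== CLAIM (what is proved, stated in full; the proofs are below) =====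
def Claim_equal_filter_po_numbers_by_raw_filter_py : Prop := ∀ (po_numbers : List String) (raw_filter_value : Option (List String)), Dom_filter_po_numbers_by_raw_filter_py po_numbers raw_filter_value → Pre_filter_po_numbers_by_raw_filter_py po_numbers raw_filter_value → Spec_filter_po_numbers_by_raw_filter_py po_numbers raw_filter_value (filter_po_numbers_by_raw_filter_py po_numbers raw_filter_value)

-- ===== LEMMAS AND PROOFS =====

lemma pvGlob_star (p : List Char) (s : List Char) :
    pvGlob ('*' :: p) s = (List.range (s.length + 1)).any (fun i => pvGlob p (s.drop i)) := by
  induction s with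
  | nil => simp [pvGlob]
  | cons c s ih =>
    have h1 : pvGlob ('*' :: p) (c :: s) = (pvGlob p (c :: s) || pvGlob ('*' :: p) s) := by
      simp [pvGlob]
    rw [Bool.eq_iff_iff]
    simp only [h1, ih, Bool.or_eq_true, List.any_eq_true, List.mem_range, List.length_cons]
    constructor
    · rintro (h | ⟨i, hi, h⟩)
      · exact ⟨0, by omega, h⟩
      · exact ⟨i + 1, by omega, by simpa using h⟩
    · rintro ⟨i, hi, h⟩
      cases i with
      | zero => exact Or.inl (by simpa using h)
      | succ j => exact Or.inr ⟨j, by omega, by simpa using h⟩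

lemma pvGlob_cons_cons (c d : Char) (p s : List Char) (hs : c ≠ '*') :
    pvGlob (c :: p) (d :: s) = ((c == '?' || c == d) && pvGlob p s) := by
  simp [pvGlob, hs]

lemma pvGlob_cons_nil (c : Char) (p : List Char) (hs : c ≠ '*') :
    pvGlob (c :: p) [] = false := by
  simp [pvGlob, hs]

-- pvGlob on a non-star head, at a dropped position
lemma pvGlob_cons_drop (t : List Char) (p : List Char) (c : Char) (hs : c ≠ '*') (j : Nat) :
    pvGlob (c :: p) (t.drop j)
      = (decide (j < t.length) && ((c == '?' || c == t.getD j c) && pvGlob p (t.drop (j + 1)))) := by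
  by_cases hlt : j < t.length
  · have hg : t.getD j c = t[j] := List.getD_eq_getElem t c hlt
    rw [List.drop_eq_getElem_cons hlt, pvGlob_cons_cons c _ p _ hs, hg]
    simp [hlt]
  · rw [List.drop_eq_nil_of_le (show t.length ≤ j by omega)]
    rw [pvGlob_cons_nil c p hs]
    simp [hlt]

lemma pbWildStep_sim (t : List Char) (p : List Char) (c : Char) (pos : List Nat)
    (hb : ∀ j ∈ pos, j ≤ t.length) :
    (pbWildStep t pos c).any (fun j => pvGlob p (t.drop j))
      = pos.any (fun j => pvGlob (c :: p) (t.drop j)) := by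
  unfold pbWildStep
  by_cases hs : c = '*'
  · subst hs
    rw [if_pos rfl]
    cases hmin : PySem.List.min? pos (fun j => j) with
    | none =>
      have hnil : pos = [] := (PySem.List.min?_eq_none_iff pos (fun j => j)).mp hmin
      subst hnil; simp
    | some m =>
      have hm_mem : m ∈ pos := PySem.List.min?_mem hmin
      have hm_min : ∀ y ∈ pos, m ≤ y := PySem.List.min?_isMin hmin
      have hmn : m ≤ t.length := hb m hm_mem
      rw [Bool.eq_iff_iff]
      simp only [List.any_eq_true, PySem.Set.mem_ofList, List.mem_range'_1]
      constructor
      · rintro ⟨k, ⟨hk1, hk2⟩, h⟩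
        refine ⟨m, hm_mem, ?_⟩
        rw [pvGlob_star]
        simp only [List.any_eq_true, List.mem_range, List.drop_drop, List.length_drop]
        refine ⟨k - m, by omega, ?_⟩
        rw [show m + (k - m) = k from by omega]
        exact h
      · rintro ⟨j, hj, h⟩
        rw [pvGlob_star] at h
        simp only [List.any_eq_true, List.mem_range, List.drop_drop, List.length_drop] at h
        obtain ⟨i, hi, h⟩ := h
        have hjn : j ≤ t.length := hb j hj
        refine ⟨i + j, ⟨by have := hm_min j hj; omega, by omega⟩, ?_⟩
        rw [show i + j = j + i from Nat.add_comm i j]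
        exact h
  · rw [if_neg hs]
    rw [Bool.eq_iff_iff]
    by_cases hq : c = '?'
    · subst hq
      rw [if_pos rfl]
      simp only [List.any_eq_true, PySem.Set.mem_ofList, List.mem_map, List.mem_filter,
        decide_eq_true_eq]
      constructor
      · rintro ⟨k, ⟨j, ⟨hj, hlt⟩, rfl⟩, h⟩
        refine ⟨j, hj, ?_⟩
        rw [pvGlob_cons_drop t p '?' hs j]
        simp [hlt, h]
      · rintro ⟨j, hj, h⟩
        rw [pvGlob_cons_drop t p '?' hs j] at h
        simp only [Bool.and_eq_true, decide_eq_true_eq, Bool.or_eq_true] at h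
        exact ⟨j + 1, ⟨j, ⟨hj, h.1⟩, rfl⟩, h.2.2⟩
    · have hqq : (c == '?') = false := by simpa using hq
      rw [if_neg hq]
      simp only [List.any_eq_true, PySem.Set.mem_ofList, List.mem_map, List.mem_filter,
        Bool.and_eq_true, decide_eq_true_eq, beq_iff_eq]
      constructor
      · rintro ⟨k, ⟨j, ⟨hj, hlt, heq⟩, rfl⟩, h⟩
        refine ⟨j, hj, ?_⟩
        rw [pvGlob_cons_drop t p c hs j]
        simp only [hqq, Bool.false_or, Bool.and_eq_true, decide_eq_true_eq, beq_iff_eq]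
        have hg : t.getD j c = t[j] := List.getD_eq_getElem t c hlt
        rw [hg] at heq
        have hg2 : t.getD j c = t[j] := hg
        exact ⟨hlt, by rw [hg2, heq], h⟩
      · rintro ⟨j, hj, h⟩
        rw [pvGlob_cons_drop t p c hs j] at h
        simp only [hqq, Bool.false_or, Bool.and_eq_true, decide_eq_true_eq, beq_iff_eq] at h
        exact ⟨j + 1, ⟨j, ⟨hj, h.1, h.2.1.symm⟩, rfl⟩, h.2.2⟩

lemma pbWildStep_bound (t : List Char) (c : Char) (pos : List Nat)
    (hb : ∀ j ∈ pos, j ≤ t.length) :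
    ∀ j ∈ pbWildStep t pos c, j ≤ t.length := by
  intro j hj
  unfold pbWildStep at hj
  by_cases hs : c = '*'
  · rw [if_pos hs] at hj
    cases hmin : PySem.List.min? pos (fun j => j) with
    | none => rw [hmin] at hj; exact hb j hj
    | some m =>
      have hmn : m ≤ t.length := hb m (PySem.List.min?_mem hmin)
      rw [hmin] at hj
      rw [PySem.Set.mem_ofList] at hj
      have := (List.mem_range'_1.mp hj).2
      omega
  · rw [if_neg hs] at hj
    by_cases hq : c = '?' <;> [rw [if_pos hq] at hj; rw [if_neg hq] at hj] <;>
    · rw [PySem.Set.mem_ofList] at hj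
      obtain ⟨i, hi, rfl⟩ := List.mem_map.mp hj
      have := (List.mem_filter.mp hi).2
      simp at this
      omega

lemma pbFold_spec (t : List Char) (p : List Char) (pos : List Nat)
    (hb : ∀ j ∈ pos, j ≤ t.length) :
    (p.foldl (pbWildStep t) pos).contains t.length
      = pos.any (fun j => pvGlob p (t.drop j)) := by
  induction p generalizing pos with
  | nil =>
    rw [Bool.eq_iff_iff]
    simp only [List.foldl_nil, PySem.Set.contains_iff, List.any_eq_true, pvGlob,
      List.isEmpty_iff, List.drop_eq_nil_iff]
    constructor
    · intro h; exact ⟨t.length, h, by omega⟩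
    · rintro ⟨j, hj, h⟩
      have := hb j hj
      have : j = t.length := by omega
      subst this; exact hj
  | cons c p ih =>
    rw [List.foldl_cons, ih (pbWildStep t pos c) (pbWildStep_bound t c pos hb),
      pbWildStep_sim t p c pos hb]

lemma pbWildMatch_eq (pat s : String) : pbWildMatch pat s = pvGlob pat.toList s.toList := by
  unfold pbWildMatch
  rw [pbFold_spec s.toList pat.toList (PySem.Set.ofList [0]) (by intro j hj; simp [PySem.Set.mem_ofList] at hj; omega)]
  show ([0].any fun j => pvGlob pat.toList (s.toList.drop j)) = _
  simp

-- Python str.strip is idempotent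
lemma pvCharsStrip_idem (s : List Char) : PySem.Chars.strip (PySem.Chars.strip s) = PySem.Chars.strip s := by
  simp only [PySem.Chars.strip, PySem.Chars.lstrip, PySem.Chars.rstrip]
  set p := PySem.Chars.isspace
  set t := List.dropWhile p s with ht
  set u := (List.dropWhile p t.reverse).reverse with hu
  have htt : List.dropWhile p t = t := List.dropWhile_idempotent p s
  have hpre : u <+: t := by
    have h := List.reverse_prefix.mpr (List.dropWhile_suffix (l := t.reverse) p)
    simpa [← hu] using h
  have hud : List.dropWhile p u = u := by
    rw [List.dropWhile_eq_self_iff]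
    intro hl
    have h0 : u[0] = t[0]'(by
      have := hpre.length_le
      have : 0 < t.length := lt_of_lt_of_le hl this
      exact this) := List.IsPrefix.getElem hpre _
    rw [h0]
    exact List.dropWhile_eq_self_iff.mp htt _
  rw [hud, hu, List.reverse_reverse, List.dropWhile_idempotent]

lemma pvStrStrip_idem (v : String) : PySem.Str.strip (PySem.Str.strip v) = PySem.Str.strip v := by
  rw [← String.toList_inj]
  simp [PySem.Str.toList_strip, pvCharsStrip_idem]

-- Set.contains through add, as a Bool equation
lemma pvContains_add (E : PySem.Set String) (v po : String) :
    PySem.Set.contains (PySem.Set.add E v) po = (po == v || PySem.Set.contains E po) := by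
  rw [Bool.eq_iff_iff]
  simp [PySem.Set.mem_add, or_comm, beq_iff_eq]

-- proof-side abbreviation for the wildcard-token test both programs perform
def pvCheck (v : String) : Bool := ["*", "?", "%", "_"].any (fun ch => PySem.Str.isIn ch v)

-- A's per-value pattern test equals the token scan on an already-stripped value
lemma pvIsPattern_eq (v : String) (h : PySem.Str.strip v = v) (hne : v ≠ "") :
    pyIsPatternPoFilterValue v = pvCheck v := by
  unfold pyIsPatternPoFilterValue pvCheck
  rw [h, if_neg (by simpa using hne)]

lemma pbStep_eq (ep : PySem.Set String × List String) (v : String) :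
    pbStep ep v =
      if pvCheck v then
        (ep.1, ep.2 ++ [PySem.Str.lower (PySem.Str.replace (PySem.Str.replace v "%" "*") "_" "?")])
      else (PySem.Set.add ep.1 v, ep.2) := rfl

-- the fold invariant for B's preprocessing (f abstracts the pattern matcher)
lemma pbStep_fold (po : String) (f : String → Bool) (vs : List String)
    (E : PySem.Set String) (P : List String) :
    (PySem.Set.contains (vs.foldl pbStep (E, P)).1 po
      || (vs.foldl pbStep (E, P)).2.any f)
    = (PySem.Set.contains E po || P.any f
      || vs.any (fun v =>
           if pvCheck v then
             f (PySem.Str.lower (PySem.Str.replace (PySem.Str.replace v "%" "*") "_" "?"))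
           else po == v)) := by
  induction vs generalizing E P with
  | nil => simp
  | cons v vs ih =>
    rw [List.foldl_cons, pbStep_eq, List.any_cons]
    by_cases hc : pvCheck v = true
    · rw [if_pos hc, ih, if_pos hc]
      simp only [List.any_append, List.any_cons, List.any_nil, Bool.or_false]
      ac_rfl
    · rw [if_neg hc, ih, pvContains_add, if_neg hc]
      ac_rfl

theorem filter_po_numbers_by_raw_filter_py_spec : Claim_equal_filter_po_numbers_by_raw_filter_py := by
  intro po_numbers raw _ _
  unfold Spec_filter_po_numbers_by_raw_filter_py
  unfold filter_po_numbers_by_raw_filter_py filter_po_numbers_by_raw_filter_py_alt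
    pyNormalizePoFilterValues
  cases raw with
  | none => simp
  | some l =>
    simp only
    set va := l.filter (fun v => PySem.Str.strip v != "") with hva
    have hmap : (l.map (fun v => PySem.Str.strip v)).filter (fun t => t != "")
        = va.map (fun v => PySem.Str.strip v) := by
      rw [List.filter_map, hva]
      rfl
    rw [hmap]
    have hnil : (va.map (fun v => PySem.Str.strip v) = []) ↔ (va = []) := List.map_eq_nil_iff
    by_cases h0 : va = []
    · rw [if_pos h0, if_pos (hnil.mpr h0)]
    · rw [if_neg h0, if_neg (fun h => h0 (hnil.mp h))]
      rw [PySem.List.foldl_append_if_eq_filter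
            (fun po => va.any (fun raw => pyMatchesPoFilterValue po raw)) po_numbers []]
      rw [List.nil_append]
      apply List.filter_congr
      intro po _
      rw [pbStep_fold po (fun p => pbWildMatch p (PySem.Str.lower po))
            (va.map (fun v => PySem.Str.strip v)) PySem.Set.empty []]
      simp only [PySem.Set.contains, List.contains, List.any_map, List.any_nil]
      apply PySem.List.any_congr_mem
      intro r hr
      have hrs : PySem.Str.strip r ≠ "" := by
        rw [hva] at hr
        have := (List.mem_filter.mp hr).2
        simpa using this
      unfold pyMatchesPoFilterValue
      simp only [Function.comp]
      rw [if_neg (by simpa using hrs)]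
      rw [pvIsPattern_eq (PySem.Str.strip r) (pvStrStrip_idem r) hrs]
      by_cases hc : pvCheck (PySem.Str.strip r) = true
      · rw [if_pos hc, if_pos hc, pbWildMatch_eq]
        rfl
      · rw [if_neg hc, if_neg hc]
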